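-- pv_equiv track=rewrite | github.com/brunohsaz/Process-IMG | backup/Yolo_v5_Plate_bkp/previsao13-12.py | corrigir_char
-- ===== SOURCE A (Python) =====
-- CORRECOES = {
--     '0': ['O', 'Q'], '1': ['I', 'L'], '2': ['Z'], '4': ['A'], '5': ['S'], '6': ['G'], '8': ['B'],
--     'O': ['0', 'Q'], 'I': ['1', 'L'], 'Z': ['2'], 'S': ['5'], 'G': ['6']
-- }
--
-- def corrigir_char(ch, deve_ser_letra):
--     for destino, origens in CORRECOES.items():
--         if ch in origens:
--             if deve_ser_letra and destino.isalpha():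
--                 return destino
--             elif not deve_ser_letra and destino.isdigit():
--                 return destino
--     return ch
-- ===== SOURCE B (Python) =====
-- CORRECOES = {
--     '0': ['O', 'Q'], '1': ['I', 'L'], '2': ['Z'], '4': ['A'], '5': ['S'], '6': ['G'], '8': ['B'],
--     'O': ['0', 'Q'], 'I': ['1', 'L'], 'Z': ['2'], 'S': ['5'], 'G': ['6']
-- }
--
-- # Reverse-lookup tables built once at import time: per-call scan disappears.
-- LETTER_MAP = {o: d for d, os in CORRECOES.items() if d.isalpha() for o in os}
-- DIGIT_MAP = {o: d for d, os in CORRECOES.items() if d.isdigit() for o in os}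
--
-- def corrigir_char(ch, deve_ser_letra):
--     return (LETTER_MAP if deve_ser_letra else DIGIT_MAP).get(ch, ch)
-- ===== Notes on version B (the rewrite author's own statement) =====
-- stated objective: idiomatic
-- what changed: Replaces A's per-call scan over CORRECOES (with an alpha/digit branch inside the loop) by two reverse-lookup dicts precomputed once at module scope, so each call is a single dict .get.
import Mathlib
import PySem

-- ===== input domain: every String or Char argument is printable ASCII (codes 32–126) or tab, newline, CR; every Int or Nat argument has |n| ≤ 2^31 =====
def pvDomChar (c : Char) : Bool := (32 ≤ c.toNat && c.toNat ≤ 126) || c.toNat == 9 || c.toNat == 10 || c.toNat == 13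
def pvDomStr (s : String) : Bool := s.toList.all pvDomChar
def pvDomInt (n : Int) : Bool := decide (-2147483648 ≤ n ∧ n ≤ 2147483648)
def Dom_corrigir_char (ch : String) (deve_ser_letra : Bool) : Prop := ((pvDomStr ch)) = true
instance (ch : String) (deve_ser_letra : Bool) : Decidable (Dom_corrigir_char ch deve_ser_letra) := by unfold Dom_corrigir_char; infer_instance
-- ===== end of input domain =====

-- B replaces A's per-call scan over CORRECOES by two reverse-lookup dicts built once (idiomatic).

-- ===== PORT A =====
def CORRECOES : PySem.Dict String (List String) := PySem.Dict.ofList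
  [("0", ["O", "Q"]), ("1", ["I", "L"]), ("2", ["Z"]), ("4", ["A"]), ("5", ["S"]),
   ("6", ["G"]), ("8", ["B"]),
   ("O", ["0", "Q"]), ("I", ["1", "L"]), ("Z", ["2"]), ("S", ["5"]), ("G", ["6"])]

-- the 'for destino, origens in CORRECOES.items():' loop with its early returns
def corrigir_char_loop (ch : String) (deve_ser_letra : Bool) : List (String × List String) → String
  | [] => ch
  | (destino, origens) :: rest =>
    if origens.contains ch then
      if deve_ser_letra && PySem.Str.strIsalpha destino then destino
      else if !deve_ser_letra && PySem.Str.strIsdigit destino then destino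
      else corrigir_char_loop ch deve_ser_letra rest
    else corrigir_char_loop ch deve_ser_letra rest

def corrigir_char (ch : String) (deve_ser_letra : Bool) : String :=
  corrigir_char_loop ch deve_ser_letra CORRECOES.items

-- ===== PORT B =====
-- LETTER_MAP = {o: d for d, os in CORRECOES.items() if d.isalpha() for o in os}
def LETTER_MAP : PySem.Dict String String :=
  CORRECOES.items.foldl
    (fun dict p =>
      if PySem.Str.strIsalpha p.1 then p.2.foldl (fun d o => d.insert o p.1) dict else dict)
    PySem.Dict.empty

-- DIGIT_MAP = {o: d for d, os in CORRECOES.items() if d.isdigit() for o in os}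
def DIGIT_MAP : PySem.Dict String String :=
  CORRECOES.items.foldl
    (fun dict p =>
      if PySem.Str.strIsdigit p.1 then p.2.foldl (fun d o => d.insert o p.1) dict else dict)
    PySem.Dict.empty

def corrigir_char_alt (ch : String) (deve_ser_letra : Bool) : String :=
  (if deve_ser_letra then LETTER_MAP else DIGIT_MAP).getD ch ch

-- ===== PRECONDITION & SPEC =====
def Spec_corrigir_char (ch : String) (deve_ser_letra : Bool) (out : String) : Prop := out = corrigir_char_alt ch deve_ser_letra
instance (ch : String) (deve_ser_letra : Bool) (out : String) : Decidable (Spec_corrigir_char ch deve_ser_letra out) := by unfold Spec_corrigir_char; infer_instance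

-- ===== CLAIM (what is proved, stated in full; the proofs are below) =====
def Claim_equal_corrigir_char : Prop := ∀ (ch : String) (deve_ser_letra : Bool), Dom_corrigir_char ch deve_ser_letra → Spec_corrigir_char ch deve_ser_letra (corrigir_char ch deve_ser_letra)

-- ===== LEMMAS AND PROOFS =====

def pvKeys : List String :=
  ["0", "1", "2", "4", "5", "6", "8", "O", "Q", "I", "L", "Z", "A", "S", "G", "B"]

theorem CORRECOES_items :
    CORRECOES.items =
      [("0", ["O", "Q"]), ("1", ["I", "L"]), ("2", ["Z"]), ("4", ["A"]), ("5", ["S"]),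
       ("6", ["G"]), ("8", ["B"]),
       ("O", ["0", "Q"]), ("I", ["1", "L"]), ("Z", ["2"]), ("S", ["5"]), ("G", ["6"])] := by
  decide

theorem LETTER_MAP_eval :
    LETTER_MAP = PySem.Dict.mk
      [("0", "O"), ("Q", "O"), ("1", "I"), ("L", "I"), ("2", "Z"), ("5", "S"), ("6", "G")] := by
  decide

theorem DIGIT_MAP_eval :
    DIGIT_MAP = PySem.Dict.mk
      [("O", "0"), ("Q", "0"), ("I", "1"), ("L", "1"), ("Z", "2"), ("A", "4"), ("S", "5"),
       ("G", "6"), ("B", "8")] := by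
  decide

theorem corrigir_char_eq_alt (ch : String) (b : Bool) :
    corrigir_char ch b = corrigir_char_alt ch b := by
  by_cases h : ch ∈ pvKeys
  · simp only [pvKeys, List.mem_cons, List.not_mem_nil, or_false] at h
    rcases h with h | h | h | h | h | h | h | h | h | h | h | h | h | h | h | h <;>
      subst h <;> cases b <;> decide
  · simp only [pvKeys, List.mem_cons, List.not_mem_nil, or_false, not_or] at h
    obtain ⟨h0, h1, h2, h4, h5, h6, h8, hO, hQ, hI, hL, hZ, hA, hS, hG, hB⟩ := h
    cases b <;>
      simp [corrigir_char, corrigir_char_alt, corrigir_char_loop, CORRECOES_items,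
        LETTER_MAP_eval, DIGIT_MAP_eval, PySem.Dict.getD, PySem.Dict.get?, h0, h1, h2, h4, h5, h6, h8, hO, hQ, hI, hL, hZ, hA, hS, hG, hB,
        Ne.symm h0, Ne.symm h1, Ne.symm h2, Ne.symm h4, Ne.symm h5, Ne.symm h6, Ne.symm h8,
        Ne.symm hO, Ne.symm hQ, Ne.symm hI, Ne.symm hL, Ne.symm hZ, Ne.symm hA, Ne.symm hS,
        Ne.symm hG, Ne.symm hB]

-- ===== VERDICT (by name: the statement is the Claim_ definition above) =====
theorem corrigir_char_spec : Claim_equal_corrigir_char := by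
  intro ch b _
  unfold Spec_corrigir_char
  exact corrigir_char_eq_alt ch b
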